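-- pv_equiv track=rewrite | github.com/AdeDZY/bert | gov2_to_passages_sentences.py | to_passages
-- ===== SOURCE A (Python) =====
-- def to_passages(sentences):
--     passages = []
--     s, e = 0, 0
--     target_length = 300
--     sent_lengths = [len(sent.split(' ')) for sent in sentences]
--     while s < len(sentences):
--         curr_p_len = sent_lengths[e]
--         while curr_p_len < target_length:
--             e += 1
--             if e >= len(sentences):
--                 break
--             curr_p_len += sent_lengths[e]
--         passages.append((s, e))
--         if e > s:
--             s = e + 1 # one setence overlap
--             e = s
--         else:
--             s += 1
--             e = s
--     return passages
-- ===== SOURCE B (Python) =====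
-- def to_passages(sentences):
--     n = len(sentences)
--     prefix = [0]
--     total = 0
--     for sent in sentences:
--         total += len(sent.split(' '))
--         prefix.append(total)
--     passages = []
--     s = 0
--     while s < n:
--         # binary search: smallest k in [s+1, n+1) with prefix[k] >= prefix[s] + 300
--         target = prefix[s] + 300
--         lo, hi = s + 1, n + 1
--         while lo < hi:
--             mid = (lo + hi) // 2
--             if prefix[mid] < target:
--                 lo = mid + 1
--             else:
--                 hi = mid
--         e = lo - 1
--         passages.append((s, e))
--         s = e + 1
--     return passages
-- ===== Notes on version B (the rewrite author's own statement) =====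
-- stated objective: alternative
-- what changed: Replaces A's linear accumulate-until-300 inner scan with a precomputed prefix-sum array and a binary search (bisect_left of prefix[s]+300) to find each passage end.
import Mathlib
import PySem

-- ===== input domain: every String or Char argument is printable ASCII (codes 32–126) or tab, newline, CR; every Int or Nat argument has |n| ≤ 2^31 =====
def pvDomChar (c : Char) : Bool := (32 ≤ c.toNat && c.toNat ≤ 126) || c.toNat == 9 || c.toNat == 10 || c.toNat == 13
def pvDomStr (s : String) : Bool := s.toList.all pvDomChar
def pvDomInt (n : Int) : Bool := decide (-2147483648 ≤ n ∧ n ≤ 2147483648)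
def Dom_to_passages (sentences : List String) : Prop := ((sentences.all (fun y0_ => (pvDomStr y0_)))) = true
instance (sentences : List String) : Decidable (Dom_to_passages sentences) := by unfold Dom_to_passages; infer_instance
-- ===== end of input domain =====

-- B replaces A's accumulate-until-300 inner scan with a precomputed prefix-sum array and a
-- binary search (bisect_left of prefix[s]+300) per passage (objective: alternative algorithm).


-- ===== PORT A =====
-- len(sent.split(' ')) for one sentence (used by both ports, as in both Pythons)
def pvSentLen (t : String) : Nat := (PySem.Chars.splitOn t.toList [' ']).length

-- A's inner `while curr_p_len < target_length` loop (state: e, curr_p_len); the fuel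
-- argument only makes the loop structurally total and is always sufficient at the call site
def pvInnerA (L : List Nat) (n fuel e curr : Nat) : Nat :=
  match fuel with
  | 0 => e
  | fuel + 1 =>
    if curr < 300 then
      if e + 1 ≥ n then e + 1
      else pvInnerA L n fuel (e + 1) (curr + L.getD (e + 1) 0)
    else e

-- A's outer `while s < len(sentences)` loop (at its top e = s always holds in A)
def pvOuterA (L : List Nat) (n fuel s : Nat) : List (Int × Int) :=
  match fuel with
  | 0 => []
  | fuel + 1 =>
    if s < n then
      let e := pvInnerA L n (n - s) s (L.getD s 0)
      ((s : Int), (e : Int)) ::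
        (if e > s then pvOuterA L n fuel (e + 1) else pvOuterA L n fuel (s + 1))
    else []

def to_passages (sentences : List String) : List (Int × Int) :=
  pvOuterA (sentences.map pvSentLen) sentences.length (sentences.length + 1) 0

-- ===== PORT B =====
-- B's prefix-sum construction: the for-loop appending running totals
def pvPrefixAux (L : List Nat) (total : Nat) : List Nat :=
  match L with
  | [] => []
  | l :: rest => (total + l) :: pvPrefixAux rest (total + l)

def pvPrefix (L : List Nat) : List Nat := 0 :: pvPrefixAux L 0

-- B's inner binary search (bisect_left of target in prefix on [lo, hi)); fuel ≥ hi - lo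
def pvBis (P : List Nat) (x fuel lo hi : Nat) : Nat :=
  match fuel with
  | 0 => lo
  | fuel + 1 =>
    if lo < hi then
      if P.getD ((lo + hi) / 2) 0 < x then pvBis P x fuel ((lo + hi) / 2 + 1) hi
      else pvBis P x fuel lo ((lo + hi) / 2)
    else lo

-- B's outer `while s < n` loop
def pvOuterB (P : List Nat) (n fuel s : Nat) : List (Int × Int) :=
  match fuel with
  | 0 => []
  | fuel + 1 =>
    if s < n then
      let e := pvBis P (P.getD s 0 + 300) n (s + 1) (n + 1) - 1
      ((s : Int), (e : Int)) :: pvOuterB P n fuel (e + 1)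
    else []

def to_passages_alt (sentences : List String) : List (Int × Int) :=
  let L := sentences.map pvSentLen
  pvOuterB (pvPrefix L) L.length (L.length + 1) 0

-- ===== PRECONDITION & SPEC =====
def Spec_to_passages (sentences : List String) (out : List (Int × Int)) : Prop := out = to_passages_alt sentences
instance (sentences : List String) (out : List (Int × Int)) : Decidable (Spec_to_passages sentences out) := by unfold Spec_to_passages; infer_instance

-- ===== CLAIM (what is proved, stated in full; the proofs are below) =====
def Claim_equal_to_passages : Prop := ∀ (sentences : List String), Dom_to_passages sentences → Spec_to_passages sentences (to_passages sentences)

-- ===== LEMMAS AND PROOFS =====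

-- partial sums of the length list
def pvPsum (L : List Nat) (j : Nat) : Nat := (L.take j).sum

theorem pvPsum_succ (L : List Nat) (j : Nat) (h : j < L.length) :
    pvPsum L (j + 1) = pvPsum L j + L.getD j 0 := by
  unfold pvPsum
  rw [List.take_add_one, List.sum_append, List.getD_eq_getElem?_getD,
      List.getElem?_eq_getElem h]
  simp

theorem pvPsum_mono (L : List Nat) {i j : Nat} (h : i ≤ j) : pvPsum L i ≤ pvPsum L j := by
  unfold pvPsum
  have h1 : L.take i = (L.take j).take i := by rw [List.take_take, min_eq_left h]
  rw [h1]
  exact ((L.take j).take_sublist i).sum_le_sum (by simp)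

theorem pvPrefixAux_getD (L : List Nat) (total j : Nat) (h : j < L.length) :
    (pvPrefixAux L total).getD j 0 = total + pvPsum L (j + 1) := by
  induction L generalizing total j with
  | nil => simp at h
  | cons l rest ih =>
    cases j with
    | zero => simp [pvPrefixAux, pvPsum]
    | succ k =>
      have hk : k < rest.length := by simpa using h
      have := ih (total + l) k hk
      simp only [pvPrefixAux, List.getD_cons_succ, this, pvPsum, List.take_succ_cons,
        List.sum_cons]
      omega

theorem pvPrefix_getD (L : List Nat) (j : Nat) (h : j ≤ L.length) :
    (pvPrefix L).getD j 0 = pvPsum L j := by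
  cases j with
  | zero => simp [pvPrefix, pvPsum]
  | succ k =>
    have hk : k < L.length := by omega
    simp only [pvPrefix, List.getD_cons_succ]
    simpa using pvPrefixAux_getD L 0 k hk

-- linear-scan bisect_left specification
def pvLin (P : List Nat) (x lo hi : Nat) : Nat :=
  if lo < hi then
    if x ≤ P.getD lo 0 then lo else pvLin P x (lo + 1) hi
  else lo
termination_by hi - lo
decreasing_by omega

theorem pvLin_ge (P : List Nat) (x lo hi : Nat) : lo ≤ pvLin P x lo hi := by
  rw [pvLin]
  split
  · split
    · exact le_refl lo
    · exact le_trans (by omega) (pvLin_ge P x (lo + 1) hi)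
  · exact le_refl lo
termination_by hi - lo
decreasing_by omega

theorem pvLin_skip (P : List Nat) (x lo m hi : Nat) (h1 : lo ≤ m) (h2 : m ≤ hi)
    (hlt : ∀ i, lo ≤ i → i < m → P.getD i 0 < x) :
    pvLin P x lo hi = pvLin P x m hi := by
  rcases Nat.eq_or_lt_of_le h1 with heq | hlt'
  · rw [heq]
  · rw [pvLin]
    have hx : ¬ x ≤ P.getD lo 0 := by
      have := hlt lo (le_refl lo) hlt'
      omega
    simp only [if_pos (by omega : lo < hi), if_neg hx]
    exact pvLin_skip P x (lo + 1) m hi (by omega) h2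
      (fun i hi1 hi2 => hlt i (by omega) hi2)
termination_by m - lo
decreasing_by omega

theorem pvLin_cut (P : List Nat) (x lo m hi : Nat) (h1 : lo ≤ m) (h2 : m < hi)
    (hge : x ≤ P.getD m 0) :
    pvLin P x lo hi = pvLin P x lo m := by
  rcases Nat.eq_or_lt_of_le h1 with heq | hlt'
  · subst heq
    rw [pvLin]
    rw [if_pos h2, if_pos hge]
    rw [pvLin]
    simp
  · rw [pvLin]
    conv_rhs => rw [pvLin]
    simp only [if_pos (by omega : lo < hi), if_pos hlt']
    split
    · rfl
    · exact pvLin_cut P x (lo + 1) m hi (by omega) h2 hge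
termination_by m - lo
decreasing_by omega

theorem pvBis_eq_lin (P : List Nat) (x fuel lo hi : Nat)
    (hmono : ∀ i j, i ≤ j → j < hi → P.getD i 0 ≤ P.getD j 0) (hfuel : hi - lo ≤ fuel) :
    pvBis P x fuel lo hi = pvLin P x lo hi := by
  induction fuel generalizing lo hi with
  | zero =>
    rw [pvBis, pvLin]
    simp only [if_neg (by omega : ¬ lo < hi)]
  | succ fuel ih =>
    rw [pvBis]
    split
    · rename_i hlh
      have hmid1 : lo ≤ (lo + hi) / 2 := by omega
      have hmid2 : (lo + hi) / 2 < hi := by omega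
      split
      · rename_i hPx
        rw [ih ((lo + hi) / 2 + 1) hi hmono (by omega)]
        exact (pvLin_skip P x lo ((lo + hi) / 2 + 1) hi (by omega) (by omega)
          (fun i hi1 hi2 => lt_of_le_of_lt (hmono i ((lo + hi) / 2) (by omega) hmid2) hPx)).symm
      · rename_i hPx
        rw [ih lo ((lo + hi) / 2) (fun i j hij hj => hmono i j hij (by omega)) (by omega)]
        exact (pvLin_cut P x lo ((lo + hi) / 2) hi hmid1 hmid2 (by omega)).symm
    · rw [pvLin]
      simp [*]

theorem pvInner_eq_lin (L : List Nat) (fuel e curr : Nat) (he : e < L.length)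
    (hfuel : L.length - e ≤ fuel) :
    pvInnerA L L.length fuel e curr
      = pvLin (pvPrefix L) (pvPsum L (e + 1) + (300 - curr)) (e + 1) (L.length + 1) - 1 := by
  induction fuel generalizing e curr with
  | zero => omega
  | succ fuel ih =>
    have hP1 : (pvPrefix L).getD (e + 1) 0 = pvPsum L (e + 1) := pvPrefix_getD L (e + 1) (by omega)
    rw [pvInnerA]
    by_cases hc : curr < 300
    · simp only [if_pos hc]
      have hxgt : ¬ (pvPsum L (e + 1) + (300 - curr) ≤ (pvPrefix L).getD (e + 1) 0) := by
        rw [hP1]; omega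
      conv_rhs => rw [pvLin]
      simp only [if_pos (by omega : e + 1 < L.length + 1), if_neg hxgt]
      by_cases hend : e + 1 ≥ L.length
      · simp only [if_pos hend]
        rw [pvLin]
        simp only [if_neg (by omega : ¬ (e + 2 < L.length + 1))]
        omega
      · simp only [if_neg hend]
        have he1 : e + 1 < L.length := by omega
        rw [ih (e + 1) (curr + L.getD (e + 1) 0) he1 (by omega)]
        have h11 : e + 1 + 1 = e + 2 := by omega
        rw [h11]
        have hstep : pvPsum L (e + 2) = pvPsum L (e + 1) + L.getD (e + 1) 0 :=
          pvPsum_succ L (e + 1) he1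
        by_cases hcl : curr + L.getD (e + 1) 0 ≤ 300
        · have hx : pvPsum L (e + 2) + (300 - (curr + L.getD (e + 1) 0))
              = pvPsum L (e + 1) + (300 - curr) := by omega
          rw [hx]
        · have hP2 : (pvPrefix L).getD (e + 2) 0 = pvPsum L (e + 2) :=
            pvPrefix_getD L (e + 2) (by omega)
          rw [pvLin]
          conv_rhs => rw [pvLin]
          simp only [if_pos (by omega : e + 2 < L.length + 1)]
          rw [if_pos (by rw [hP2]; omega), if_pos (by rw [hP2]; omega)]
    · simp only [if_neg hc]
      have h0 : 300 - curr = 0 := by omega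
      rw [pvLin, h0]
      simp only [Nat.add_zero, if_pos (by omega : e + 1 < L.length + 1), if_pos (le_of_eq hP1.symm)]
      omega

theorem pvPrefix_mono (L : List Nat) (i j : Nat) (hij : i ≤ j) (hj : j < L.length + 1) :
    (pvPrefix L).getD i 0 ≤ (pvPrefix L).getD j 0 := by
  rw [pvPrefix_getD L i (by omega), pvPrefix_getD L j (by omega)]
  exact pvPsum_mono L hij

theorem pvOuter_eq (L : List Nat) (fuel s : Nat) :
    pvOuterA L L.length fuel s = pvOuterB (pvPrefix L) L.length fuel s := by
  induction fuel generalizing s with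
  | zero => rfl
  | succ fuel ih =>
    rw [pvOuterA, pvOuterB]
    by_cases hs : s < L.length
    · simp only [if_pos hs]
      have hPs : (pvPrefix L).getD s 0 = pvPsum L s := pvPrefix_getD L s (by omega)
      have hbis : pvBis (pvPrefix L) ((pvPrefix L).getD s 0 + 300) L.length (s + 1) (L.length + 1)
          = pvLin (pvPrefix L) (pvPsum L s + 300) (s + 1) (L.length + 1) := by
        rw [hPs]
        exact pvBis_eq_lin _ _ _ _ _ (pvPrefix_mono L) (by omega)
      have hinner := pvInner_eq_lin L (L.length - s) s (L.getD s 0) hs (by omega)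
      have hstep : pvPsum L (s + 1) = pvPsum L s + L.getD s 0 := pvPsum_succ L s hs
      have heq : pvInnerA L L.length (L.length - s) s (L.getD s 0)
          = pvBis (pvPrefix L) ((pvPrefix L).getD s 0 + 300) L.length (s + 1) (L.length + 1) - 1 := by
        rw [hbis, hinner]
        by_cases hl : L.getD s 0 ≤ 300
        · have hx : pvPsum L (s + 1) + (300 - L.getD s 0) = pvPsum L s + 300 := by omega
          rw [hx]
        · have hP1 : (pvPrefix L).getD (s + 1) 0 = pvPsum L (s + 1) :=
            pvPrefix_getD L (s + 1) (by omega)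
          rw [pvLin]
          conv_rhs => rw [pvLin]
          simp only [if_pos (by omega : s + 1 < L.length + 1)]
          rw [if_pos (by rw [hP1]; omega), if_pos (by rw [hP1]; omega)]
      have hge : s ≤ pvInnerA L L.length (L.length - s) s (L.getD s 0) := by
        rw [hinner]
        have := pvLin_ge (pvPrefix L) (pvPsum L (s + 1) + (300 - L.getD s 0)) (s + 1) (L.length + 1)
        omega
      rw [← heq]
      refine congrArg₂ _ rfl ?_
      by_cases hgt : pvInnerA L L.length (L.length - s) s (L.getD s 0) > s
      · simp only [if_pos hgt]
        exact ih (pvInnerA L L.length (L.length - s) s (L.getD s 0) + 1)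
      · have hEq : pvInnerA L L.length (L.length - s) s (L.getD s 0) = s := by omega
        simp only [hEq, gt_iff_lt, lt_irrefl, if_false]
        exact ih (s + 1)
    · simp [if_neg hs]

-- ===== VERDICT (by name: the statement is the Claim_ definition above) =====
theorem to_passages_spec : Claim_equal_to_passages := by
  intro sentences _
  unfold Spec_to_passages to_passages to_passages_alt
  simpa using pvOuter_eq (sentences.map pvSentLen) (sentences.length + 1) 0
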